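-- pv_equiv track=rewrite | github.com/CathrinePaulsen/marco-repro | client/client/range_converter.py | get_continuous_ranges
-- ===== SOURCE A (Python) =====
-- def get_continuous_ranges(compatible_versions, available_versions):
--     """
--     Groups elements in compatible_versions that appear consecutively in available_versions.
--     :param compatible_versions: list[ComparableVersion]
--     :param available_versions: list[ComparableVersion]
--     :return: list[ComparableVersion]
--     """
--     continuous_ranges = []
--     current_range = []
--
--     for av in available_versions:
--         if av in compatible_versions:
--             current_range.append(av)
--         elif current_range:
--             continuous_ranges.append(current_range)
--             current_range = []
--
--     if current_range:
--         continuous_ranges.append(current_range)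
--
--     return continuous_ranges
-- ===== SOURCE B (Python) =====
-- def get_continuous_ranges(compatible_versions, available_versions):
--     result = []
--     i, n = 0, len(available_versions)
--     while i < n:
--         if available_versions[i] in compatible_versions:
--             j = i + 1
--             while j < n and available_versions[j] in compatible_versions:
--                 j += 1
--             result.append(available_versions[i:j])
--             i = j
--         else:
--             i += 1
--     return result
-- ===== Notes on version B (the rewrite author's own statement) =====
-- stated objective: alternative
-- what changed: Replaces A's accumulator-and-flush single pass (append to current_range, flush on transitions and at the end) with an index-based outer scan that skips incompatible versions and extracts each maximal compatible run whole via an inner scan and a slice.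
import Mathlib
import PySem

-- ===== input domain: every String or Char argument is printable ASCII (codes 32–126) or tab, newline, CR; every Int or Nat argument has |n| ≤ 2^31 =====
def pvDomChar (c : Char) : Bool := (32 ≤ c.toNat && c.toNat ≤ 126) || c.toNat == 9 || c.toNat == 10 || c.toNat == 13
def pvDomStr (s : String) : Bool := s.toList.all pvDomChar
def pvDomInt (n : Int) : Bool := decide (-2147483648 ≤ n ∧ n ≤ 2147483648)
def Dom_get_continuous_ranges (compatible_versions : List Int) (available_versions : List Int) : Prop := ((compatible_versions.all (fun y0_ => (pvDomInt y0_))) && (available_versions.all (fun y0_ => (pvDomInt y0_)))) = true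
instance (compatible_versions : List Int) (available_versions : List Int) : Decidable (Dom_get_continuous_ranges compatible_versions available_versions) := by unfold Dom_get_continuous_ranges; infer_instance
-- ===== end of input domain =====

-- ===== PORT A =====
-- B is an alternative decomposition (skip incompatibles, extract each maximal compatible run whole); same cost as A.
def get_continuous_ranges (compatible_versions : List Int) (available_versions : List Int) : List (List Int) :=
  let st := available_versions.foldl
    (fun (st : List (List Int) × List Int) av =>
      if compatible_versions.contains av then (st.1, st.2 ++ [av])
      else if st.2 ≠ [] then (st.1 ++ [st.2], ([] : List Int))
      else st)
    ([], [])
  if st.2 ≠ [] then st.1 ++ [st.2] else st.1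

-- ===== PORT B =====
-- outer while loop: skip an incompatible version, or take the maximal compatible run
-- (inner while loop = takeWhile, the slice's remainder = dropWhile) and continue after it
def altGo (compatible_versions : List Int) : List Int → List (List Int)
  | [] => []
  | v :: vs =>
    if compatible_versions.contains v then
      (v :: vs.takeWhile (fun x => compatible_versions.contains x)) ::
        altGo compatible_versions (vs.dropWhile (fun x => compatible_versions.contains x))
    else altGo compatible_versions vs
termination_by l => l.length
decreasing_by
  · simpa using Nat.lt_succ_of_le (List.length_dropWhile_le _ _)
  · simp

def get_continuous_ranges_alt (compatible_versions : List Int) (available_versions : List Int) : List (List Int) :=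
  altGo compatible_versions available_versions

-- ===== PRECONDITION & SPEC =====
def Spec_get_continuous_ranges (compatible_versions : List Int) (available_versions : List Int) (out : List (List Int)) : Prop := out = get_continuous_ranges_alt compatible_versions available_versions
instance (compatible_versions : List Int) (available_versions : List Int) (out : List (List Int)) : Decidable (Spec_get_continuous_ranges compatible_versions available_versions out) := by unfold Spec_get_continuous_ranges; infer_instance

-- ===== CLAIM (what is proved, stated in full; the proofs are below) =====
def Claim_equal_get_continuous_ranges : Prop := ∀ (compatible_versions : List Int) (available_versions : List Int), Dom_get_continuous_ranges compatible_versions available_versions → Spec_get_continuous_ranges compatible_versions available_versions (get_continuous_ranges compatible_versions available_versions)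

-- ===== LEMMAS AND PROOFS =====

-- A's final flush
def pvFinish (st : List (List Int) × List Int) : List (List Int) :=
  if st.2 ≠ [] then st.1 ++ [st.2] else st.1

-- A's result described recursively: current run `cur`, flush on transitions and at the end
def runsA (cs : List Int) (cur : List Int) : List Int → List (List Int)
  | [] => if cur ≠ [] then [cur] else []
  | v :: vs =>
    if cs.contains v then runsA cs (cur ++ [v]) vs
    else if cur ≠ [] then cur :: runsA cs [] vs
    else runsA cs [] vs

theorem foldl_eq_runsA (cs : List Int) (l : List Int) :
    ∀ (rs : List (List Int)) (cur : List Int),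
    pvFinish (l.foldl
      (fun (st : List (List Int) × List Int) av =>
        if cs.contains av then (st.1, st.2 ++ [av])
        else if st.2 ≠ [] then (st.1 ++ [st.2], ([] : List Int))
        else st) (rs, cur)) = rs ++ runsA cs cur l := by
  induction l with
  | nil =>
    intro rs cur
    by_cases hc : cur = [] <;> simp [pvFinish, runsA, hc]
  | cons v vs ih =>
    intro rs cur
    simp only [List.foldl_cons]
    by_cases hv : cs.contains v = true
    · rw [if_pos hv, ih rs (cur ++ [v]), runsA, if_pos hv]
    · rw [if_neg hv]
      by_cases hc : cur = []
      · subst hc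
        rw [if_neg (by simp), ih rs [], runsA, if_neg hv, if_neg (by simp)]
      · rw [if_pos hc, ih (rs ++ [cur]) [], runsA, if_neg hv, if_pos hc]
        simp

theorem runsA_eq_altGo (cs : List Int) (l : List Int) :
    ∀ cur : List Int,
    runsA cs cur l =
      if cur = [] then altGo cs l
      else (cur ++ l.takeWhile (fun x => cs.contains x)) ::
           altGo cs (l.dropWhile (fun x => cs.contains x)) := by
  induction l with
  | nil =>
    intro cur
    by_cases hc : cur = [] <;> simp [runsA, altGo, hc]
  | cons v vs ih =>
    intro cur
    by_cases hv : cs.contains v = true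
    · by_cases hc : cur = []
      · subst hc
        rw [runsA, if_pos hv, ih ([] ++ [v]), if_neg (by simp), if_pos rfl, altGo, if_pos hv]
        simp only [List.nil_append, List.singleton_append]
      · rw [runsA, if_pos hv, ih (cur ++ [v]), if_neg (by simp [hc]), if_neg hc,
          List.takeWhile_cons_of_pos hv, List.dropWhile_cons_of_pos hv]
        simp only [List.append_assoc, List.singleton_append]
    · by_cases hc : cur = []
      · subst hc
        rw [runsA, if_neg hv, if_neg (by simp), ih [], if_pos rfl, if_pos rfl, altGo,
          if_neg hv]
      · rw [runsA, if_neg hv, if_pos hc, ih [], if_pos rfl, if_neg hc,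
          List.takeWhile_cons_of_neg hv, List.dropWhile_cons_of_neg hv, altGo, if_neg hv]
        simp

-- ===== VERDICT (by name: the statement is the Claim_ definition above) =====
theorem get_continuous_ranges_spec : Claim_equal_get_continuous_ranges := by
  intro cs avs _
  unfold Spec_get_continuous_ranges get_continuous_ranges get_continuous_ranges_alt
  show pvFinish (avs.foldl
      (fun (st : List (List Int) × List Int) av =>
        if cs.contains av then (st.1, st.2 ++ [av])
        else if st.2 ≠ [] then (st.1 ++ [st.2], ([] : List Int))
        else st) ([], [])) = altGo cs avs
  rw [foldl_eq_runsA cs avs [] [], runsA_eq_altGo cs avs [], if_pos rfl]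
  simp
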